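-- pv_equiv track=rewrite | github.com/meekBSD/scripts_For_Seq | test_itertools.py | get_random
-- ===== SOURCE A (Python) =====
-- import itertools
--
-- def get_random(s, n):
--     sample_N = []
--     num = len(s)
--     N_base_comb = list(itertools.combinations(range(num), n))
--
--     for primer_s in N_base_comb:
--         L_nucl = list(s)
--         for i in primer_s:
--             L_nucl[i] = "N"
--         sample_N.append(L_nucl)
--     return sample_N
-- ===== SOURCE B (Python) =====
-- def get_random(s, n):
--     # Binary-choice recursion: at each character either substitute "N" (using one
--     # of the k remaining substitutions) or keep it; replaces itertools.combinations.
--     # On n < 0 (where A raises ValueError) this returns [].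
--     if n < 0:
--         return []
--
--     def go(cs, k):
--         if k == 0:
--             return [list(cs)]
--         if not cs:
--             return []
--         head, rest = cs[0], cs[1:]
--         return [["N"] + tail for tail in go(rest, k - 1)] + \
--                [[head] + tail for tail in go(rest, k)]
--
--     return go(list(s), n)
-- ===== Notes on version B (the rewrite author's own statement) =====
-- stated objective: alternative
-- what changed: Replaces the itertools.combinations-of-indices pass (generate index tuples, then copy the string and overwrite each chosen index) with a direct binary-choice recursion on the character list: at each position either spend one substitution on 'N' or keep the character, which yields the same lexicographic order without ever materialising index combinations.
-- crash fix: On n < 0 A raises ValueError (from itertools.combinations); B returns []. — e.g. on get_random("ab", -1): A raises ValueError, B returns []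
import Mathlib
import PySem

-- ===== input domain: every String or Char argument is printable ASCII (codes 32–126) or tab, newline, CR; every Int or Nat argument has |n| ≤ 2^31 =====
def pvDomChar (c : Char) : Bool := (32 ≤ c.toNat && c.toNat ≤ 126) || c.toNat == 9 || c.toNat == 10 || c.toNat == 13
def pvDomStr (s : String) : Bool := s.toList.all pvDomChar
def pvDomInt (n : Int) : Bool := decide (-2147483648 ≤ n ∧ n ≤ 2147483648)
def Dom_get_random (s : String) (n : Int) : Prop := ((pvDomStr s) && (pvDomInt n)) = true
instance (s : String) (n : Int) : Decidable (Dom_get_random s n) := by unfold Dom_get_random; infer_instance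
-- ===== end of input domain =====

-- B replaces the combinations-of-indices pass by a binary-choice recursion on the
-- character list (substitute-or-keep at each position); same output, same order.

-- ===== PORT A =====
-- itertools.combinations(xs, k) in lexicographic order (standard-library call,
-- ported as the standard recursive definition producing the same list).
def pyCombinations : List Nat → Nat → List (List Nat)
  | _, 0 => [[]]
  | [], _ + 1 => []
  | x :: xs, k + 1 =>
      (pyCombinations xs k).map (fun c => x :: c) ++ pyCombinations xs (k + 1)

def get_random (s : String) (n : Int) : List (List String) :=
  let num := s.toList.length
  -- combinations raises ValueError for n < 0 (excluded by Pre_); n.toNat only hit there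
  let n_base_comb := pyCombinations (List.range num) n.toNat
  n_base_comb.map (fun primer_s =>
    -- L_nucl = list(s); for i in primer_s: L_nucl[i] = "N"  (indices always in range)
    primer_s.foldl (fun l_nucl i => l_nucl.set i "N")
      (s.toList.map (fun c => String.ofList [c])))

-- ===== PORT B =====
def goB : List Char → Nat → List (List String)
  | cs, 0 => [cs.map (fun c => String.ofList [c])]
  | [], _ + 1 => []
  | c :: cs, k + 1 =>
      ((goB cs k).map (fun tail => "N" :: tail)) ++
      ((goB cs (k + 1)).map (fun tail => String.ofList [c] :: tail))

def get_random_alt (s : String) (n : Int) : List (List String) :=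
  if n < 0 then [] else goB s.toList n.toNat

-- ===== PRECONDITION & SPEC =====
-- Pre_ excludes exactly n < 0, where itertools.combinations raises ValueError.
def Pre_get_random (s : String) (n : Int) : Prop := 0 ≤ n
instance (s : String) (n : Int) : Decidable (Pre_get_random s n) := by
  unfold Pre_get_random; infer_instance

def pvWitness_get_random : String × Int := ("abc", 2)

-- On n < 0 A raises ValueError (from itertools.combinations); B returns [].
def Raises_get_random (s : String) (n : Int) : Prop := n < 0
instance (s : String) (n : Int) : Decidable (Raises_get_random s n) := by
  unfold Raises_get_random; infer_instance
def pvRaiseWitness_get_random : String × Int := ("ab", -1)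
def pvRaiseWitnessOut_get_random : List (List String) := []

def Spec_get_random (s : String) (n : Int) (out : List (List String)) : Prop :=
  out = get_random_alt s n
instance (s : String) (n : Int) (out : List (List String)) : Decidable (Spec_get_random s n out) := by
  unfold Spec_get_random; infer_instance

-- ===== CLAIM (what is proved, stated in full; the proofs are below) =====
def Claim_equal_get_random : Prop := ∀ (s : String) (n : Int),
  Dom_get_random s n → Pre_get_random s n → Spec_get_random s n (get_random s n)

def Claim_raises_get_random : Prop :=
  (∀ (s : String) (n : Int), Dom_get_random s n → Raises_get_random s n → ¬ Pre_get_random s n) ∧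
  (Dom_get_random (pvRaiseWitness_get_random.1) (pvRaiseWitness_get_random.2) ∧
   Raises_get_random (pvRaiseWitness_get_random.1) (pvRaiseWitness_get_random.2) ∧
   get_random_alt (pvRaiseWitness_get_random.1) (pvRaiseWitness_get_random.2) = pvRaiseWitnessOut_get_random)

-- ===== LEMMAS AND PROOFS =====

theorem pyCombinations_map {f : Nat → Nat} :
    ∀ (xs : List Nat) (k : Nat),
      pyCombinations (xs.map f) k = (pyCombinations xs k).map (List.map f)
  | xs, 0 => by simp [pyCombinations]
  | [], k + 1 => by simp [pyCombinations]
  | x :: xs, k + 1 => by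
      simp [pyCombinations, pyCombinations_map xs k, pyCombinations_map xs (k + 1),
        List.map_map, Function.comp_def]

theorem foldl_set_succ (p : List Nat) :
    ∀ (x : String) (L : List String),
      p.foldl (fun l i => l.set (i + 1) "N") (x :: L) =
        x :: p.foldl (fun l i => l.set i "N") L := by
  induction p with
  | nil => intro x L; simp
  | cons i p ih => intro x L; simp [List.foldl_cons, ih]

theorem main_lemma : ∀ (cs : List Char) (k : Nat),
    (pyCombinations (List.range cs.length) k).map
      (fun p => p.foldl (fun l i => l.set i "N") (cs.map (fun c => String.ofList [c]))) =
    goB cs k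
  | cs, 0 => by simp [pyCombinations, goB]
  | [], k + 1 => by simp [pyCombinations, goB]
  | c :: cs, k + 1 => by
      rw [List.length_cons, List.range_succ_eq_map]
      show (pyCombinations (0 :: (List.range cs.length).map Nat.succ) (k + 1)).map _ = _
      rw [pyCombinations]
      rw [pyCombinations_map (List.range cs.length) k,
          pyCombinations_map (List.range cs.length) (k + 1)]
      rw [goB]
      rw [List.map_append, List.map_map, List.map_map, List.map_map]
      congr 1
      · rw [← main_lemma cs k, List.map_map]
        refine List.map_congr_left ?_
        intro p _
        show (0 :: p.map Nat.succ).foldl (fun l i => l.set i "N")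
              ((c :: cs).map (fun c => String.ofList [c])) = _
        rw [List.foldl_cons]
        have : (((c :: cs).map (fun c => String.ofList [c])).set 0 "N") =
            "N" :: cs.map (fun c => String.ofList [c]) := by simp
        rw [this, List.foldl_map]
        simpa using foldl_set_succ p "N" (cs.map (fun c => String.ofList [c]))
      · rw [← main_lemma cs (k + 1), List.map_map]
        refine List.map_congr_left ?_
        intro p _
        show (p.map Nat.succ).foldl (fun l i => l.set i "N")
              (String.ofList [c] :: cs.map (fun c => String.ofList [c])) = _
        rw [List.foldl_map]
        simpa using foldl_set_succ p (String.ofList [c]) (cs.map (fun c => String.ofList [c]))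

-- ===== VERDICT (by name: the statement is the Claim_ definition above) =====
theorem get_random_spec : Claim_equal_get_random := by
  intro s n _ hpre
  unfold Spec_get_random get_random get_random_alt
  rw [if_neg (by exact not_lt.mpr hpre)]
  exact main_lemma s.toList n.toNat

@[simp] theorem get_random_raises : Claim_raises_get_random := by
  unfold Claim_raises_get_random
  refine ⟨?_, by decide⟩
  intro s n _ h
  unfold Raises_get_random at h
  unfold Pre_get_random
  omega
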